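-- pv_equiv track=rewrite | github.com/jlfowler1084/CareerPilot | scanner/morning_scan.py | filter_irrelevant
-- ===== SOURCE A (Python) =====
-- def filter_irrelevant(jobs: list[dict]) -> list[dict]:
--     """Filter out clearly irrelevant jobs."""
--     noise = [
--         "pest control", "hvac", "construction project", "transportation engineer",
--         "mechanical engineer", "civil engineer", "epc project", "nurse", "physician",
--         "pharmacist", "warehouse", "forklift", "delivery driver", "custodian",
--     ]
--     filtered = []
--     for job in jobs:
--         t = (job.get("title") or "").lower()
--         if not any(n in t for n in noise):
--             filtered.append(job)
--     return filtered
-- ===== SOURCE B (Python) =====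
-- _NOISE = [
--     "pest control", "hvac", "construction project", "transportation engineer",
--     "mechanical engineer", "civil engineer", "epc project", "nurse", "physician",
--     "pharmacist", "warehouse", "forklift", "delivery driver", "custodian",
-- ]
--
-- # Index the noise phrases once by their first character, so that each title is
-- # scanned in a single position-major pass: at each position only the phrases
-- # starting with that character are prefix-tested (no per-phrase substring scan).
-- _BY_FIRST = {}
-- for _n in _NOISE:
--     _BY_FIRST.setdefault(_n[0], []).append(_n)
--
--
-- def _hit(t):
--     for i in range(len(t)):
--         for n in _BY_FIRST.get(t[i], []):
--             if t.startswith(n, i):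
--                 return True
--     return False
--
--
-- def filter_irrelevant(jobs: list[dict]) -> list[dict]:
--     """Filter out clearly irrelevant jobs."""
--     return [job for job in jobs if not _hit((job.get("title") or "").lower())]
-- ===== Notes on version B (the rewrite author's own statement) =====
-- stated objective: alternative
-- what changed: A loops over all 14 noise phrases per job, running a separate substring scan ('n in t') for each; B builds a first-character index of the phrases once and scans each title in a single position-major pass, prefix-testing only the phrases whose first character matches the current position.
import Mathlib
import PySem

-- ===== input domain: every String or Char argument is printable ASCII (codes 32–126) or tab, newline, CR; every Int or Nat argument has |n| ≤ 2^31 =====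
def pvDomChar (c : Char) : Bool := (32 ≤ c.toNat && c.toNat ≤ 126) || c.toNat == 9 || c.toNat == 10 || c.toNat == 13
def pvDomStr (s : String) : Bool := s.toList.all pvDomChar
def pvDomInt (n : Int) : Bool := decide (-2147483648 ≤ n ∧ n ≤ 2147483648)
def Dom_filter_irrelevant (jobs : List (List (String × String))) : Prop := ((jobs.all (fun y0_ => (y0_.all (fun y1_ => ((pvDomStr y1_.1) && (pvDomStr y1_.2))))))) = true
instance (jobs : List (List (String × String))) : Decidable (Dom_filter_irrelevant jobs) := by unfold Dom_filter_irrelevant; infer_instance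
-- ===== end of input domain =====

-- B replaces A's per-title loop over all 14 noise phrases (one substring scan each)
-- by a first-character index built once, so each title is scanned in a single
-- position-major pass prefix-testing only the phrases starting at that character
-- (idiomatic/alternative; same return value).

-- the noise-phrase literal shared by both Pythons (A binds it locally, B at module level)
def pvNoise : List String := [
  "pest control", "hvac", "construction project", "transportation engineer",
  "mechanical engineer", "civil engineer", "epc project", "nurse", "physician",
  "pharmacist", "warehouse", "forklift", "delivery driver", "custodian"]

-- ===== PORT A =====
def filter_irrelevant (jobs : List (List (String × String))) : List (List (String × String)) :=
  jobs.foldl (fun filtered job =>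
    -- t = (job.get("title") or "").lower(); the 'or ""' yields "" both when the key is
    -- missing and when the value is "" (the only falsy string), i.e. getD with default ""
    let t := PySem.Str.lower (PySem.Dict.getD (PySem.Dict.ofList job) "title" "")
    if !(pvNoise.any fun n => PySem.Str.isIn n t) then filtered ++ [job] else filtered) []

-- ===== PORT B =====
-- _n[0]; every pvNoise entry is nonempty, so pyGet? is always some and the default is dead
def pvFirstChar (n : String) : Char := (PySem.Str.pyGet? n 0).getD ' '

-- _BY_FIRST: for _n in _NOISE: _BY_FIRST.setdefault(_n[0], []).append(_n)
def pvByFirst : PySem.Dict Char (List String) :=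
  pvNoise.foldl (fun d n => d.modify (pvFirstChar n) [] (fun v => v ++ [n])) PySem.Dict.empty

-- _hit: the loop 'for i in range(len(t)): for n in _BY_FIRST.get(t[i], []):
-- if t.startswith(n, i): return True' ported as recursion over the i-th suffix
-- (c :: rest = t[i:]; t.startswith(n, i) is exactly the prefix test on that suffix)
def pvHit : List Char → Bool
  | [] => false
  | c :: rest =>
    ((pvByFirst.getD c []).any fun n => PySem.Chars.startswith (c :: rest) n.toList) || pvHit rest

def filter_irrelevant_alt (jobs : List (List (String × String))) : List (List (String × String)) :=
  jobs.filter (fun job =>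
    !(pvHit (PySem.Str.lower (PySem.Dict.getD (PySem.Dict.ofList job) "title" "")).toList))

-- ===== PRECONDITION & SPEC =====
def Spec_filter_irrelevant (jobs : List (List (String × String))) (out : List (List (String × String))) : Prop := out = filter_irrelevant_alt jobs
instance (jobs : List (List (String × String))) (out : List (List (String × String))) : Decidable (Spec_filter_irrelevant jobs out) := by unfold Spec_filter_irrelevant; infer_instance

-- ===== CLAIM (what is proved, stated in full; the proofs are below) =====
def Claim_equal_filter_irrelevant : Prop := ∀ (jobs : List (List (String × String))), Dom_filter_irrelevant jobs → Spec_filter_irrelevant jobs (filter_irrelevant jobs)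

-- ===== LEMMAS AND PROOFS =====

-- the first-character index holds exactly the noise phrases starting with that character
lemma pvByFirst_getD (c : Char) :
    pvByFirst.getD c [] = pvNoise.filter (fun n => pvFirstChar n == c) := by
  have h := List.foldl_map (f := fun n => (pvFirstChar n, n))
    (g := fun (d : PySem.Dict Char (List String)) p => d.modify p.1 [] (fun v => v ++ [p.2]))
    (l := pvNoise) (init := PySem.Dict.empty)
  unfold pvByFirst
  rw [← h, PySem.Dict.getD_foldl_modify_append, PySem.Dict.getD_empty]
  simp [List.filter_map, Function.comp_def]

lemma pvNoise_ne_nil : ∀ n ∈ pvNoise, n.toList ≠ [] := by decide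

lemma pvFirstChar_of_prefix (n : String) (c : Char) (rest : List Char)
    (hne : n.toList ≠ []) (h : n.toList <+: c :: rest) : pvFirstChar n = c := by
  cases hl : n.toList with
  | nil => exact absurd hl hne
  | cons a as =>
    rw [hl] at h
    obtain ⟨tl, htl⟩ := h
    have : a = c := by
      have := congrArg (fun l => l.head?) htl
      simpa using this
    subst this
    simp [pvFirstChar, PySem.Str.pyGet?, PySem.List.pyGet?, PySem.List.pyIdx?, hl]

-- the position-major first-char-indexed scan finds exactly the phrases A's 'n in t' finds
lemma pvHit_eq (t : List Char) :
    pvHit t = pvNoise.any (fun n => PySem.Chars.isIn n.toList t) := by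
  induction t with
  | nil =>
    have : pvNoise.any (fun n => PySem.Chars.isIn n.toList ([] : List Char)) = false := by decide
    simp [pvHit, this]
  | cons c rest ih =>
    apply Bool.eq_iff_iff.mpr
    simp only [pvHit, Bool.or_eq_true, List.any_eq_true, pvByFirst_getD, List.mem_filter,
      beq_iff_eq, PySem.Chars.startswith_iff, PySem.Chars.isIn_iff_infix, ih,
      List.infix_cons_iff]
    constructor
    · rintro (⟨n, ⟨hn, _⟩, hpre⟩ | ⟨n, hn, hinf⟩)
      · exact ⟨n, hn, Or.inl hpre⟩
      · exact ⟨n, hn, Or.inr hinf⟩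
    · rintro ⟨n, hn, hpre | hinf⟩
      · exact Or.inl ⟨n, ⟨hn, pvFirstChar_of_prefix n c rest (pvNoise_ne_nil n hn) hpre⟩, hpre⟩
      · exact Or.inr ⟨n, hn, hinf⟩

-- ===== VERDICT (by name: the statement is the Claim_ definition above) =====
theorem filter_irrelevant_spec : Claim_equal_filter_irrelevant := by
  intro jobs _
  show filter_irrelevant jobs = filter_irrelevant_alt jobs
  have hA : filter_irrelevant jobs =
      [] ++ jobs.filter (fun job =>
        !(pvNoise.any fun n =>
          PySem.Str.isIn n (PySem.Str.lower (PySem.Dict.getD (PySem.Dict.ofList job) "title" "")))) :=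
    PySem.List.foldl_append_if_eq_filter _ jobs []
  rw [hA, List.nil_append]
  unfold filter_irrelevant_alt
  apply List.filter_congr
  intro job _
  congr 1
  rw [pvHit_eq]
  simp [PySem.Str.isIn_eq]
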